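-- pv_equiv track=rewrite | github.com/DenysRybak/AlgoK2 | lab2Algos/main.py | maximumConsecutiveNumbers
-- ===== SOURCE A (Python) =====
-- def maximumConsecutiveNumbers(arr, N):
--
--     v = []
--     count = 0
--
--     for i in range(N):
--         if (arr[i] == 0):
--             count += 1
--         else:
--             v.append(arr[i])
--
--     v.sort()
--
--     v = set(v)
--     v = list(v)
--
--     MAXN = 110000
--
--
--     pref = [0 for i in range(MAXN + 1)]
--
--     for i in range(len(v)):
--         pref[v[i]] += 1
--
--     for i in range(1, MAXN + 1, 1):
--         pref[i] += pref[i - 1]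
--
--     mx = 0
--
--     for i in range(1, MAXN + 1, 1):
--         l = i
--         r = MAXN
--         local_max = 0
--         while (l <= r):
--             mid = (l + r) // 2
--
--             if (pref[mid] - pref[i - 1] + count >= (mid - i + 1)):
--                 l = mid + 1
--                 local_max = max(local_max, mid - i + 1)
--
--             else:
--                 r = mid - 1
--         mx = max(mx, local_max)
--     return mx
-- ===== SOURCE B (Python) =====
-- def maximumConsecutiveNumbers(arr, N):
--     # One marking pass plus one two-pointer sweep over 1..MAXN, instead of A's
--     # per-start binary searches over a prefix-count table.
--     MAXN = 110000
--     count = 0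
--     present = [False] * (MAXN + 1)
--     for x in arr[:max(N, 0)]:
--         if x == 0:
--             count += 1
--         elif 1 <= x <= MAXN:
--             # values outside the table can never join a run inside [1, MAXN]
--             present[x] = True
--     best = 0
--     i = 1
--     miss = 0
--     for j in range(1, MAXN + 1):
--         if not present[j]:
--             miss += 1
--         while miss > count:
--             if not present[i]:
--                 miss -= 1
--             i += 1
--         best = max(best, j - i + 1)
--     return best
-- ===== Notes on version B (the rewrite author's own statement) =====
-- stated objective: faster
-- what changed: A sorts/dedups the values, builds a prefix-count table and runs a binary search over the table for each of the 110000 window starts; B marks present values in a boolean table in one pass and finds the longest coverable window with a single two-pointer sweep.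
-- outside the precondition, e.g. on maximumConsecutiveNumbers([-1, 109999], 2): A returns 2, B returns 1; on maximumConsecutiveNumbers([110000, -110000, 109998, -3, -5, -3], 6): A returns 3, B returns 1
import Mathlib
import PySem

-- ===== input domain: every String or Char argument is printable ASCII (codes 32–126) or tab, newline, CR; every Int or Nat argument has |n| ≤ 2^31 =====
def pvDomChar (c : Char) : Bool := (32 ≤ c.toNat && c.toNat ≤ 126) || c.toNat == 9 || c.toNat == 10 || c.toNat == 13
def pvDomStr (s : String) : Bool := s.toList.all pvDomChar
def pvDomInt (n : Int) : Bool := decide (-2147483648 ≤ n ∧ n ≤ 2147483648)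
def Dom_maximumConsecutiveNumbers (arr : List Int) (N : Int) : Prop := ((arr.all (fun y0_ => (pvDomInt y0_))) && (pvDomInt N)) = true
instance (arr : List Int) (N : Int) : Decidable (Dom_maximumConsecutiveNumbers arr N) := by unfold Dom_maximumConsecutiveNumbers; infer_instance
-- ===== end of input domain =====

-- B replaces A's per-start binary searches over a prefix-count table by a single
-- two-pointer sweep over the value range (objective: faster, constant-factor).

-- ===== PORT A =====
-- Python list indexing pref[i] / pref[i] = v on the pref table (indices used are
-- nonnegative and in range on every input admitted by Pre_; out of range Python raises,
-- the port returns/keeps a default there).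
def pvAget (a : Array Int) (i : Int) : Int := a.getD i.toNat 0
def pvAset (a : Array Int) (i : Int) (v : Int) : Array Int := a.setIfInBounds i.toNat v

-- the 'while (l <= r)' binary-search loop of A, step for step
def mcnBS (pref : Array Int) (count i : Int) (l r lm : Int) : Int :=
  if h : l ≤ r then
    let mid := PySem.Int.floordiv (l + r) 2
    if pvAget pref mid - pvAget pref (i - 1) + count ≥ mid - i + 1 then
      mcnBS pref count i (mid + 1) r (max lm (mid - i + 1))
    else
      mcnBS pref count i l (mid - 1) lm
  else lm
termination_by (r + 1 - l).toNat
decreasing_by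
  · have := PySem.Int.floordiv_two_mid_bounds h; omega
  · have := PySem.Int.floordiv_two_mid_bounds h; omega

def maximumConsecutiveNumbers (arr : List Int) (N : Int) : Int :=
  -- for i in range(N): count zeros / append nonzeros
  let vc := (PySem.List.pyRange 0 N 1).foldl
    (fun (s : List Int × Int) i =>
      if PySem.List.pyGetD arr i 0 == 0 then (s.1, s.2 + 1)
      else (s.1 ++ [PySem.List.pyGetD arr i 0], s.2)) ([], 0)
  let count := vc.2
  -- v.sort(); v = set(v); v = list(v)   (later use of v is order-independent)
  let v : List Int := PySem.Set.ofList (PySem.List.sorted vc.1 (fun x => x) false)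
  -- pref = [0]*(MAXN+1); for i in range(len(v)): pref[v[i]] += 1
  let pref1 := v.foldl (fun p x => pvAset p x (pvAget p x + 1)) (Array.replicate 110001 (0 : Int))
  -- for i in range(1, MAXN+1): pref[i] += pref[i-1]
  let pref := (PySem.List.pyRange 1 (110000 + 1) 1).foldl
    (fun p i => pvAset p i (pvAget p i + pvAget p (i - 1))) pref1
  -- outer loop with the binary search
  (PySem.List.pyRange 1 (110000 + 1) 1).foldl
    (fun mx i => max mx (mcnBS pref count i i 110000 0)) 0

-- ===== PORT B =====
-- the 'while miss > count' pointer-advance loop of B; fuel only makes the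
-- recursion structural (the sweep advances i at most 110001 times in total)
def mcnShrink (present : Array Bool) (count : Int) : Nat → Int × Int → Int × Int
  | 0, s => s
  | fuel + 1, s =>
    if s.2 > count then
      mcnShrink present count fuel (s.1 + 1, if present.getD s.1.toNat false then s.2 else s.2 - 1)
    else s

def maximumConsecutiveNumbers_alt (arr : List Int) (N : Int) : Int :=
  -- marking pass over arr[:max(N, 0)]
  let pc := (arr.take (max N 0).toNat).foldl
    (fun (s : Array Bool × Int) x =>
      if x == 0 then (s.1, s.2 + 1)
      else if 1 ≤ x ∧ x ≤ 110000 then (s.1.setIfInBounds x.toNat true, s.2)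
      else s) (Array.replicate 110001 false, 0)
  -- two-pointer sweep: for j in range(1, MAXN+1) with state (best, i, miss)
  let res := (PySem.List.pyRange 1 (110000 + 1) 1).foldl
    (fun (st : Int × Int × Int) j =>
      let miss1 := if pc.1.getD j.toNat false then st.2.2 else st.2.2 + 1
      let im := mcnShrink pc.1 pc.2 110002 (st.2.1, miss1)
      (max st.1 (j - im.1 + 1), im.1, im.2)) ((0 : Int), (1 : Int), (0 : Int))
  res.1

-- ===== PRECONDITION & SPEC =====
-- Pre_ excludes inputs where A raises IndexError (N beyond len(arr); a value among the
-- first N outside [-110001, 110000]) and inputs with a negative value in [-110001, -1]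
-- among the first N, where A returns a value read through Python's negative-index
-- wraparound of the pref table (an artefact of A's fixed-size table, which can even
-- count one table slot twice).
def Pre_maximumConsecutiveNumbers (arr : List Int) (N : Int) : Prop :=
  N ≤ (arr.length : Int) ∧ ∀ x ∈ arr.take N.toNat, 0 ≤ x ∧ x ≤ 110000
instance (arr : List Int) (N : Int) : Decidable (Pre_maximumConsecutiveNumbers arr N) := by
  unfold Pre_maximumConsecutiveNumbers; infer_instance

def pvWitness_maximumConsecutiveNumbers : List Int × Int := ([3, 0, 1, 110000], 4)

def Spec_maximumConsecutiveNumbers (arr : List Int) (N : Int) (out : Int) : Prop := out = maximumConsecutiveNumbers_alt arr N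
instance (arr : List Int) (N : Int) (out : Int) : Decidable (Spec_maximumConsecutiveNumbers arr N out) := by unfold Spec_maximumConsecutiveNumbers; infer_instance

-- ===== CLAIM (what is proved, stated in full; the proofs are below) =====
def Claim_equal_maximumConsecutiveNumbers : Prop := ∀ (arr : List Int) (N : Int), Dom_maximumConsecutiveNumbers arr N → Pre_maximumConsecutiveNumbers arr N → Spec_maximumConsecutiveNumbers arr N (maximumConsecutiveNumbers arr N)

-- ===== LEMMAS AND PROOFS =====

-- ---- generic array-and-sum helpers ----

lemma pvGetD_set_eq {α : Type} (a : Array α) (i : Nat) (v d : α) (h : i < a.size) :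
    (a.setIfInBounds i v).getD i d = v := by
  simp [Array.getD, h]

lemma pvGetD_set_ne {α : Type} (a : Array α) (i k : Nat) (v d : α) (h : i ≠ k) :
    (a.setIfInBounds i v).getD k d = a.getD k d := by
  by_cases hk : k < a.size
  · simp [Array.getD, hk, h]
  · simp [Array.getD, hk]

lemma pvSum_split (g : Int → Int) (i k j : Int) (h1 : i ≤ k) (h2 : k ≤ j + 1) :
    ((PySem.List.pyRange i (j + 1) 1).map g).sum
      = ((PySem.List.pyRange i k 1).map g).sum + ((PySem.List.pyRange k (j + 1) 1).map g).sum := by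
  rw [PySem.List.pyRange_one_append i k (j + 1) h1 h2, List.map_append, List.sum_append]

def pvCnt (P : Int → Bool) (i j : Int) : Int :=
  ((PySem.List.pyRange i (j + 1) 1).map (fun k => if P k then (1 : Int) else 0)).sum

def pvMiss (P : Int → Bool) (i j : Int) : Int :=
  ((PySem.List.pyRange i (j + 1) 1).map (fun k => if P k then (0 : Int) else 1)).sum

lemma pvMiss_nonneg (P : Int → Bool) (i j : Int) : 0 ≤ pvMiss P i j := by
  apply List.sum_nonneg
  intro x hx
  obtain ⟨k, _, hk⟩ := List.mem_map.1 hx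
  by_cases h : P k <;> simp [h] at hk <;> omega

lemma pvMiss_empty (P : Int → Bool) (i j : Int) (h : j + 1 ≤ i) : pvMiss P i j = 0 := by
  simp [pvMiss, PySem.List.pyRange_one_eq_nil h]

lemma pvMiss_single (P : Int → Bool) (k : Int) : pvMiss P k k = if P k then 0 else 1 := by
  simp [pvMiss, PySem.List.pyRange_one_singleton]

lemma pvMiss_split (P : Int → Bool) (i k j : Int) (h1 : i ≤ k) (h2 : k ≤ j + 1) :
    pvMiss P i j = pvMiss P i (k - 1) + pvMiss P k j := by
  have hk : k - 1 + 1 = k := by ring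
  simp only [pvMiss, hk]
  exact pvSum_split _ i k j h1 h2

lemma pvMiss_mono_right (P : Int → Bool) (i j' j : Int) (h1 : i ≤ j' + 1) (h2 : j' ≤ j) :
    pvMiss P i j' ≤ pvMiss P i j := by
  have h := pvMiss_split P i (j' + 1) j h1 (by omega)
  have h2' : j' + 1 - 1 = j' := by ring
  rw [h2'] at h
  have := pvMiss_nonneg P (j' + 1) j
  omega

lemma pvMiss_succ_right (P : Int → Bool) (i j : Int) (h : i ≤ j + 1) :
    pvMiss P i (j + 1) = pvMiss P i j + (if P (j + 1) then 0 else 1) := by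
  have h' := pvMiss_split P i (j + 1) (j + 1) h (by omega)
  have h2 : j + 1 - 1 = j := by ring
  rw [h2] at h'
  rw [h', pvMiss_single]

lemma pvMiss_succ_left (P : Int → Bool) (i j : Int) (h1 : i ≤ j) :
    pvMiss P (i + 1) j = pvMiss P i j - (if P i then 0 else 1) := by
  have h := pvMiss_split P i (i + 1) j (by omega) (by omega)
  have h2 : i + 1 - 1 = i := by ring
  rw [h2, pvMiss_single] at h
  omega

lemma pvSum_pair (l : List Int) (f g : Int → Int) (h : ∀ k, f k + g k = 1) :
    (l.map f).sum + (l.map g).sum = (l.length : Int) := by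
  induction l with
  | nil => simp
  | cons x xs ih =>
    simp only [List.map_cons, List.sum_cons, List.length_cons]
    have := h x
    push_cast
    omega

lemma pvCnt_add_pvMiss (P : Int → Bool) (i j : Int) (h : i ≤ j + 1) :
    pvCnt P i j + pvMiss P i j = j + 1 - i := by
  have hs := pvSum_pair (PySem.List.pyRange i (j + 1) 1)
    (fun k => if P k then (1 : Int) else 0) (fun k => if P k then (0 : Int) else 1)
    (by intro k; by_cases hk : P k <;> simp [hk])
  rw [PySem.List.length_pyRange_one] at hs
  unfold pvCnt pvMiss
  omega

lemma pvCnt_split (P : Int → Bool) (i k j : Int) (h1 : i ≤ k) (h2 : k ≤ j + 1) :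
    pvCnt P i j = pvCnt P i (k - 1) + pvCnt P k j := by
  have hk : k - 1 + 1 = k := by ring
  simp only [pvCnt, hk]
  exact pvSum_split _ i k j h1 h2

lemma pvFoldlMaxLe (l : List Int) (f : Int → Int) (init b : Int)
    (h0 : init ≤ b) (h : ∀ x ∈ l, f x ≤ b) :
    l.foldl (fun acc x => max acc (f x)) init ≤ b := by
  induction l generalizing init with
  | nil => exact h0
  | cons x xs ih =>
    simp only [List.foldl_cons]
    exact ih (max init (f x)) (max_le h0 (h x List.mem_cons_self)) (fun y hy => h y (List.mem_cons_of_mem _ hy))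

-- ---- A: the first loop collects the nonzero prefix values and counts the zeros ----

lemma pvLoopA (arr : List Int) (N : Int) (h : N ≤ (arr.length : Int)) :
    (PySem.List.pyRange 0 N 1).foldl
      (fun (s : List Int × Int) i =>
        if PySem.List.pyGetD arr i 0 == 0 then (s.1, s.2 + 1)
        else (s.1 ++ [PySem.List.pyGetD arr i 0], s.2)) ([], 0)
    = ((arr.take N.toNat).filter (fun x => !(x == 0)), ((arr.take N.toNat).count 0 : Int)) := by
  by_cases hN : N ≤ 0
  · have h0 : N.toNat = 0 := by omega
    rw [PySem.List.pyRange_one_eq_nil hN, h0]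
    simp
  · set t := arr.take N.toNat with ht
    have hlen : (t.length : Int) = N := by
      rw [ht, List.length_take]; omega
    have hget : ∀ i ∈ PySem.List.pyRange 0 N 1, ∀ (s : List Int × Int),
        (if PySem.List.pyGetD arr i 0 == 0 then (s.1, s.2 + 1)
          else (s.1 ++ [PySem.List.pyGetD arr i 0], s.2))
        = (if PySem.List.pyGetD t i 0 == 0 then (s.1, s.2 + 1)
          else (s.1 ++ [PySem.List.pyGetD t i 0], s.2)) := by
      intro i hi s
      have hmem := (PySem.List.mem_pyRange_one).1 hi
      have heq : PySem.List.pyGetD t i 0 = PySem.List.pyGetD arr i 0 := by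
        rw [PySem.List.pyGetD_of_nonneg _ _ hmem.1, PySem.List.pyGetD_of_nonneg _ _ hmem.1]
        rw [ht]
        simp only [List.getD]
        congr 1
        apply List.getElem?_take_of_lt
        omega
      rw [heq]
    have e1 := PySem.List.foldl_congr_mem' (PySem.List.pyRange 0 N 1)
      (fun (s : List Int × Int) i =>
        if PySem.List.pyGetD arr i 0 == 0 then (s.1, s.2 + 1)
        else (s.1 ++ [PySem.List.pyGetD arr i 0], s.2))
      (fun (s : List Int × Int) i =>
        if PySem.List.pyGetD t i 0 == 0 then (s.1, s.2 + 1)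
        else (s.1 ++ [PySem.List.pyGetD t i 0], s.2))
      ([], 0) hget
    rw [e1, ← hlen, PySem.List.foldl_pyRange_zero_pyGetD' t 0
      (fun (s : List Int × Int) x => if x == 0 then (s.1, s.2 + 1) else (s.1 ++ [x], s.2)) ([], 0)]
    have hstep : ∀ x ∈ t, ∀ (s : List Int × Int),
        (if x == 0 then (s.1, s.2 + 1) else (s.1 ++ [x], s.2))
        = (((if !(x == 0) then s.1 ++ [x] else s.1), (if x == 0 then s.2 + 1 else s.2)) : List Int × Int) := by
      intro x hx s
      by_cases hx0 : x == 0 <;> simp [hx0]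
    have e2 := PySem.List.foldl_congr_mem' t
      (fun (s : List Int × Int) x => if x == 0 then (s.1, s.2 + 1) else (s.1 ++ [x], s.2))
      (fun (s : List Int × Int) x => ((if !(x == 0) then s.1 ++ [x] else s.1), (if x == 0 then s.2 + 1 else s.2)))
      ([], 0) hstep
    rw [e2]
    rw [PySem.List.foldl_prod_mk (f := fun acc x => if !(x == 0) then acc ++ [x] else acc)
        (g := fun acc x => if x == 0 then acc + 1 else acc)]
    rw [PySem.List.foldl_append_if_eq_filter, PySem.List.foldl_beq_add_one]
    simp

-- ---- A: pref after the two build loops counts the present values ≤ k ----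

lemma pvBuild1 (v : List Int) (hv : ∀ x ∈ v, 1 ≤ x ∧ x ≤ 110000) (hnd : v.Nodup) :
    ∀ (a : Array Int), a.size = 110001 → ∀ k : Int, 0 ≤ k → k ≤ 110000 →
      (v.foldl (fun p x => pvAset p x (pvAget p x + 1)) a).size = 110001 ∧
      pvAget (v.foldl (fun p x => pvAset p x (pvAget p x + 1)) a) k
        = pvAget a k + (if k ∈ v then 1 else 0) := by
  induction v with
  | nil => intro a ha k _ _; simpa using ha
  | cons x xs ih =>
    intro a ha k hk0 hk1
    have hx := hv x List.mem_cons_self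
    have hv' : ∀ y ∈ xs, 1 ≤ y ∧ y ≤ 110000 := fun y hy => hv y (List.mem_cons_of_mem _ hy)
    have hnd' : xs.Nodup := hnd.of_cons
    have hxnot : x ∉ xs := (List.nodup_cons.1 hnd).1
    have ha' : (pvAset a x (pvAget a x + 1)).size = 110001 := by
      simp [pvAset, Array.size_setIfInBounds, ha]
    simp only [List.foldl_cons]
    obtain ⟨hsz, hget⟩ := ih hv' hnd' (pvAset a x (pvAget a x + 1)) ha' k hk0 hk1
    refine ⟨hsz, ?_⟩
    rw [hget]
    by_cases hkx : k = x
    · subst hkx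
      have : pvAget (pvAset a k (pvAget a k + 1)) k = pvAget a k + 1 := by
        unfold pvAget pvAset
        exact pvGetD_set_eq _ _ _ _ (by rw [ha]; omega)
      rw [this]
      simp [hxnot]
    · have : pvAget (pvAset a x (pvAget a x + 1)) k = pvAget a k := by
        unfold pvAget pvAset
        exact pvGetD_set_ne _ _ _ _ _ (by omega)
      rw [this]
      have : (k ∈ x :: xs) = (k ∈ xs) := by simp [hkx]
      simp [List.mem_cons, hkx]

lemma pvCnt_succ (P : Int → Bool) (i j : Int) (h : i ≤ j + 1) :
    pvCnt P i (j + 1) = pvCnt P i j + (if P (j + 1) then 1 else 0) := by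
  have h' := pvSum_split (fun k => if P k then (1 : Int) else 0) i (j + 1) (j + 1) h (by omega)
  simp only [pvCnt]
  rw [h', PySem.List.pyRange_one_singleton]
  simp

lemma pvPrefix (P : Int → Bool) (hP0 : P 0 = false) :
    ∀ (m : Nat), (m : Int) ≤ 110000 →
    ∀ (a1 : Array Int), a1.size = 110001 →
      (∀ k : Int, 0 ≤ k → k ≤ 110000 → pvAget a1 k = if P k then 1 else 0) →
    ∀ k : Int, 0 ≤ k → k ≤ 110000 →
      pvAget ((PySem.List.pyRange 1 ((m : Int) + 1) 1).foldl
          (fun p i => pvAset p i (pvAget p i + pvAget p (i - 1))) a1) k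
        = if k ≤ (m : Int) then pvCnt P 1 k else (if P k then 1 else 0) := by
  intro m
  induction m with
  | zero =>
    intro _ a1 ha hc k hk0 hk1
    rw [show ((0 : Nat) : Int) + 1 = 1 by norm_num, PySem.List.pyRange_one_eq_nil (by omega)]
    simp only [List.foldl_nil]
    by_cases hk : k ≤ ((0 : Nat) : Int)
    · have : k = 0 := by omega
      subst this
      rw [if_pos hk, hc 0 (by omega) (by omega)]
      simp [pvCnt, hP0]
    · rw [if_neg hk, hc k hk0 hk1]
  | succ n ihn =>
    intro hm a1 ha hc k hk0 hk1
    -- we need size preservation of the fold; prove it together by strengthening: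
    -- instead, note ihn gives the characterization for the prefix fold; prove size separately
    have hsz : ∀ (l : List Int) (a : Array Int),
        (l.foldl (fun p i => pvAset p i (pvAget p i + pvAget p (i - 1))) a).size = a.size := by
      intro l
      induction l with
      | nil => intro a; rfl
      | cons y ys ihy =>
        intro a
        simp only [List.foldl_cons]
        rw [ihy]
        simp [pvAset, Array.size_setIfInBounds]
    have hrange : PySem.List.pyRange 1 (((n : Int) + 1) + 1) 1
        = PySem.List.pyRange 1 ((n : Int) + 1) 1 ++ [(n : Int) + 1] :=
      PySem.List.pyRange_one_succ_right (by omega)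
    have hcast : ((n + 1 : Nat) : Int) = (n : Int) + 1 := by push_cast; ring
    rw [hcast, hrange, List.foldl_append]
    simp only [List.foldl_cons, List.foldl_nil]
    set p := (PySem.List.pyRange 1 ((n : Int) + 1) 1).foldl
        (fun p i => pvAset p i (pvAget p i + pvAget p (i - 1))) a1 with hp
    have hpsz : p.size = 110001 := by rw [hp, hsz, ha]
    have hpc : ∀ k : Int, 0 ≤ k → k ≤ 110000 →
        pvAget p k = if k ≤ (n : Int) then pvCnt P 1 k else (if P k then 1 else 0) :=
      fun k hk0 hk1 => ihn (by omega) a1 ha hc k hk0 hk1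
    have hvn1 : pvAget p ((n : Int) + 1) = if P ((n : Int) + 1) then 1 else 0 := by
      rw [hpc ((n : Int) + 1) (by omega) (by omega), if_neg (by omega)]
    have hvn : pvAget p ((n : Int) + 1 - 1) = pvCnt P 1 (n : Int) := by
      have : (n : Int) + 1 - 1 = (n : Int) := by ring
      rw [this, hpc (n : Int) (by omega) (by omega), if_pos (by omega)]
    by_cases hkn : k = (n : Int) + 1
    · subst hkn
      have : pvAget (pvAset p ((n : Int) + 1) (pvAget p ((n : Int) + 1) + pvAget p ((n : Int) + 1 - 1)))
          ((n : Int) + 1) = pvAget p ((n : Int) + 1) + pvAget p ((n : Int) + 1 - 1) := by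
        unfold pvAget pvAset
        exact pvGetD_set_eq _ _ _ _ (by rw [hpsz]; omega)
      rw [this, hvn1, hvn, pvCnt_succ P 1 (n : Int) (by omega)]
      rw [if_pos (show (n : Int) + 1 ≤ (n : Int) + 1 from le_refl _)]
      omega
    · have : pvAget (pvAset p ((n : Int) + 1) (pvAget p ((n : Int) + 1) + pvAget p ((n : Int) + 1 - 1))) k
          = pvAget p k := by
        unfold pvAget pvAset
        exact pvGetD_set_ne _ _ _ _ _ (by omega)
      rw [this, hpc k hk0 hk1]
      simp only [show (k ≤ (n : Int)) ↔ (k ≤ (n : Int) + 1) from by omega]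

-- ---- A: the binary search returns the longest feasible window at each start ----

lemma pvBS_ge (pref : Array Int) (c i : Int)
    (hdc : ∀ m' m : Int, i ≤ m' → m' ≤ m → m ≤ 110000 →
      pvAget pref m - pvAget pref (i - 1) + c ≥ m - i + 1 →
      pvAget pref m' - pvAget pref (i - 1) + c ≥ m' - i + 1) :
    ∀ l r lm : Int, i ≤ l → r ≤ 110000 →
      (∀ m : Int, i ≤ m → m ≤ 110000 → pvAget pref m - pvAget pref (i - 1) + c ≥ m - i + 1 →
        (m - i + 1 ≤ lm ∨ (l ≤ m ∧ m ≤ r))) →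
      ∀ m : Int, i ≤ m → m ≤ 110000 → pvAget pref m - pvAget pref (i - 1) + c ≥ m - i + 1 →
        m - i + 1 ≤ mcnBS pref c i l r lm := by
  intro l r lm
  induction l, r, lm using mcnBS.induct pref c i with
  | case1 l r lm h mid hcond ih =>
    intro hil hr hinv m him hm hc1
    have hmd : mid = PySem.Int.floordiv (l + r) 2 := rfl
    have hmid := PySem.Int.floordiv_two_mid_bounds h
    rw [mcnBS, dif_pos h, ← hmd, if_pos hcond]
    apply ih (by omega) hr _ m him hm hc1
    intro m2 him2 hm2 hc2
    rcases hinv m2 him2 hm2 hc2 with h1 | h2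
    · left; omega
    · by_cases hm2mid : m2 ≤ PySem.Int.floordiv (l + r) 2
      · left
        have hle : m2 - i + 1 ≤ PySem.Int.floordiv (l + r) 2 - i + 1 := by omega
        have := le_max_right lm (PySem.Int.floordiv (l + r) 2 - i + 1)
        omega
      · right; omega
  | case2 l r lm h mid hcond ih =>
    intro hil hr hinv m him hm hc1
    have hmd : mid = PySem.Int.floordiv (l + r) 2 := rfl
    have hmid := PySem.Int.floordiv_two_mid_bounds h
    rw [mcnBS, dif_pos h, ← hmd, if_neg hcond]
    apply ih hil (by omega) _ m him hm hc1
    intro m2 him2 hm2 hc2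
    rcases hinv m2 him2 hm2 hc2 with h1 | h2
    · left; exact h1
    · by_cases hm2mid : m2 ≤ mid - 1
      · right; omega
      · exact absurd (hdc mid m2 (by omega) (by omega) hm2 hc2) hcond
  | case3 l r lm h =>
    intro hil hr hinv m him hm hc1
    rw [mcnBS, dif_neg h]
    rcases hinv m him hm hc1 with h1 | h2
    · exact h1
    · omega

lemma pvBS_achieves (pref : Array Int) (c i : Int) :
    ∀ l r lm : Int, i ≤ l → r ≤ 110000 →
      (lm = 0 ∨ ∃ m : Int, i ≤ m ∧ m ≤ 110000 ∧
        pvAget pref m - pvAget pref (i - 1) + c ≥ m - i + 1 ∧ lm = m - i + 1) →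
      (mcnBS pref c i l r lm = 0 ∨ ∃ m : Int, i ≤ m ∧ m ≤ 110000 ∧
        pvAget pref m - pvAget pref (i - 1) + c ≥ m - i + 1 ∧ mcnBS pref c i l r lm = m - i + 1) := by
  intro l r lm
  induction l, r, lm using mcnBS.induct pref c i with
  | case1 l r lm h mid hcond ih =>
    intro hil hr hprop
    have hmd : mid = PySem.Int.floordiv (l + r) 2 := rfl
    have hmid := PySem.Int.floordiv_two_mid_bounds h
    rw [mcnBS, dif_pos h, ← hmd, if_pos hcond]
    apply ih (by omega) hr
    rcases le_total (mid - i + 1) lm with hmx | hmx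
    · rw [max_eq_left hmx]; exact hprop
    · rw [max_eq_right hmx]
      right
      exact ⟨mid, by omega, by omega, hcond, rfl⟩
  | case2 l r lm h mid hcond ih =>
    intro hil hr hprop
    have hmd : mid = PySem.Int.floordiv (l + r) 2 := rfl
    have hmid := PySem.Int.floordiv_two_mid_bounds h
    rw [mcnBS, dif_pos h, ← hmd, if_neg hcond]
    exact ih hil (by omega) hprop
  | case3 l r lm h =>
    intro hil hr hprop
    rw [mcnBS, dif_neg h]
    exact hprop

-- ---- B: the first loop marks the in-range nonzero prefix values and counts the zeros ----

lemma pvLoopB (t : List Int) (ht : ∀ x ∈ t, 0 ≤ x ∧ x ≤ 110000) :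
    ∀ (a : Array Bool) (c0 : Int), a.size = 110001 →
      (t.foldl (fun (s : Array Bool × Int) x =>
          if x == 0 then (s.1, s.2 + 1)
          else if 1 ≤ x ∧ x ≤ 110000 then (s.1.setIfInBounds x.toNat true, s.2)
          else s) (a, c0)).1.size = 110001 ∧
      (t.foldl (fun (s : Array Bool × Int) x =>
          if x == 0 then (s.1, s.2 + 1)
          else if 1 ≤ x ∧ x ≤ 110000 then (s.1.setIfInBounds x.toNat true, s.2)
          else s) (a, c0)).2 = c0 + (t.count 0 : Int) ∧
      ∀ k : Int, 1 ≤ k → k ≤ 110000 →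
        (t.foldl (fun (s : Array Bool × Int) x =>
          if x == 0 then (s.1, s.2 + 1)
          else if 1 ≤ x ∧ x ≤ 110000 then (s.1.setIfInBounds x.toNat true, s.2)
          else s) (a, c0)).1.getD k.toNat false
        = (a.getD k.toNat false || decide (k ∈ t.filter (fun x => !(x == 0)))) := by
  induction t with
  | nil =>
    intro a c0 ha
    refine ⟨ha, by simp, ?_⟩
    intro k _ _
    simp
  | cons x xs ih =>
    intro a c0 ha
    have hx := ht x List.mem_cons_self
    have ht' : ∀ y ∈ xs, 0 ≤ y ∧ y ≤ 110000 := fun y hy => ht y (List.mem_cons_of_mem _ hy)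
    simp only [List.foldl_cons]
    by_cases hx0 : x == 0
    · rw [if_pos hx0]
      obtain ⟨hs, hc, hg⟩ := ih ht' a (c0 + 1) ha
      refine ⟨hs, ?_, ?_⟩
      · rw [hc]
        have : x = 0 := by simpa using hx0
        subst this
        rw [List.count_cons]
        push_cast
        simp
        omega
      · intro k hk0 hk1
        rw [hg k hk0 hk1]
        have : x = 0 := by simpa using hx0
        subst this
        simp
    · rw [if_neg hx0]
      have hxne : x ≠ 0 := by simpa using hx0
      have hguard : 1 ≤ x ∧ x ≤ 110000 := ⟨by omega, hx.2⟩
      rw [if_pos hguard]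
      have ha' : (a.setIfInBounds x.toNat true).size = 110001 := by
        simp [Array.size_setIfInBounds, ha]
      obtain ⟨hs, hc, hg⟩ := ih ht' (a.setIfInBounds x.toNat true) c0 ha'
      refine ⟨hs, ?_, ?_⟩
      · rw [hc, List.count_cons]
        simp [hxne]
      · intro k hk0 hk1
        rw [hg k hk0 hk1]
        by_cases hkx : k = x
        · subst hkx
          rw [pvGetD_set_eq _ _ _ _ (by rw [ha]; omega)]
          have : k ∈ (k :: xs).filter (fun x => !(x == 0)) := by
            simp [List.mem_filter, hxne]
          simp [this]
        · rw [pvGetD_set_ne _ _ _ _ _ (by omega)]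
          congr 1
          simp [List.mem_filter, hkx]

-- ---- B: the pointer-advance loop finds the least feasible window start ----

lemma pvShrink_spec (present : Array Bool) (c : Int) (hc : 0 ≤ c) (P : Int → Bool)
    (hp : ∀ k : Int, 1 ≤ k → k ≤ 110000 → present.getD k.toNat false = P k)
    (j : Int) (hj : j ≤ 110000) :
    ∀ (fuel : Nat) (i ms : Int), 1 ≤ i → i ≤ j + 1 → ms = pvMiss P i j →
      (∀ i' : Int, 1 ≤ i' → i' < i → pvMiss P i' j > c) →
      (j + 1 - i).toNat < fuel →
      1 ≤ (mcnShrink present c fuel (i, ms)).1 ∧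
      (mcnShrink present c fuel (i, ms)).1 ≤ j + 1 ∧
      (mcnShrink present c fuel (i, ms)).2 = pvMiss P (mcnShrink present c fuel (i, ms)).1 j ∧
      (mcnShrink present c fuel (i, ms)).2 ≤ c ∧
      (∀ i' : Int, 1 ≤ i' → i' < (mcnShrink present c fuel (i, ms)).1 → pvMiss P i' j > c) := by
  intro fuel
  induction fuel with
  | zero => intro i ms _ _ _ _ hf; omega
  | succ n ihn =>
    intro i ms hi1 hij hms hmin hf
    by_cases hgt : ms > c
    · have hile : i ≤ j := by
        by_contra hgt2
        have : i = j + 1 := by omega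
        subst this
        rw [pvMiss_empty P (j + 1) j (by omega)] at hms
        omega
      have hstep : mcnShrink present c (n + 1) (i, ms)
          = mcnShrink present c n (i + 1, if present.getD i.toNat false then ms else ms - 1) := by
        rw [mcnShrink, if_pos hgt]
      have hpi : present.getD i.toNat false = P i := hp i hi1 (by omega)
      have hnext : (if present.getD i.toNat false then ms else ms - 1) = pvMiss P (i + 1) j := by
        rw [hpi, hms, pvMiss_succ_left P i j hile]
        by_cases hPi : P i <;> simp [hPi]
      rw [hstep]
      apply ihn (i + 1) _ (by omega) (by omega) hnext ?_ (by omega)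
      intro i' h1 h2
      by_cases hii : i' < i
      · exact hmin i' h1 hii
      · have : i' = i := by omega
        subst this
        rw [← hms]; exact hgt
    · have hret : mcnShrink present c (n + 1) (i, ms) = (i, ms) := by
        rw [mcnShrink, if_neg hgt]
      rw [hret]
      exact ⟨hi1, hij, hms, by omega, hmin⟩

-- ---- B: invariant of the two-pointer sweep ----

lemma pvSweep (present : Array Bool) (c : Int) (hc : 0 ≤ c) (P : Int → Bool)
    (hp : ∀ k : Int, 1 ≤ k → k ≤ 110000 → present.getD k.toNat false = P k) :
    ∀ (m : Nat), (m : Int) ≤ 110000 →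
      (let st := (PySem.List.pyRange 1 ((m : Int) + 1) 1).foldl
        (fun (st : Int × Int × Int) j =>
          let miss1 := if present.getD j.toNat false then st.2.2 else st.2.2 + 1
          let im := mcnShrink present c 110002 (st.2.1, miss1)
          (max st.1 (j - im.1 + 1), im.1, im.2)) ((0 : Int), (1 : Int), (0 : Int))
       0 ≤ st.1 ∧ 1 ≤ st.2.1 ∧ st.2.1 ≤ (m : Int) + 1 ∧ st.2.2 = pvMiss P st.2.1 (m : Int) ∧ st.2.2 ≤ c ∧
       (∀ i' : Int, 1 ≤ i' → i' < st.2.1 → pvMiss P i' (m : Int) > c) ∧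
       (st.1 = 0 ∨ ∃ p q : Int, 1 ≤ p ∧ p ≤ q ∧ q ≤ (m : Int) ∧ pvMiss P p q ≤ c ∧ st.1 = q - p + 1) ∧
       (∀ p q : Int, 1 ≤ p → p ≤ q → q ≤ (m : Int) → pvMiss P p q ≤ c → q - p + 1 ≤ st.1)) := by
  intro m
  induction m with
  | zero =>
    intro _
    rw [show ((0 : Nat) : Int) + 1 = 1 by norm_num, PySem.List.pyRange_one_eq_nil (by omega)]
    simp only [List.foldl_nil, Nat.cast_zero]
    refine ⟨le_refl _, le_refl _, by norm_num, (pvMiss_empty P 1 0 (by omega)).symm, hc, ?_, ?_, ?_⟩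
    · intro i' h1 h2; omega
    · left; trivial
    · intro p q h1 h2 h3 _; omega
  | succ n ihn =>
    intro hm
    have hcast : ((n + 1 : Nat) : Int) = (n : Int) + 1 := by push_cast; ring
    rw [hcast, PySem.List.pyRange_one_succ_right (by omega), List.foldl_append]
    obtain ⟨hb0, hi1, hile, hms, hmsc, hmin, hach, hbound⟩ := ihn (by omega)
    set st := (PySem.List.pyRange 1 ((n : Int) + 1) 1).foldl
        (fun (st : Int × Int × Int) j =>
          let miss1 := if present.getD j.toNat false then st.2.2 else st.2.2 + 1
          let im := mcnShrink present c 110002 (st.2.1, miss1)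
          (max st.1 (j - im.1 + 1), im.1, im.2)) ((0 : Int), (1 : Int), (0 : Int)) with hst
    simp only [List.foldl_cons, List.foldl_nil]
    -- the single new step at j = n + 1
    have hj1 : (1 : Int) ≤ (n : Int) + 1 := by omega
    have hpj : present.getD ((n : Int) + 1).toNat false = P ((n : Int) + 1) :=
      hp ((n : Int) + 1) hj1 (by omega)
    have hmiss1 : (if present.getD ((n : Int) + 1).toNat false then st.2.2 else st.2.2 + 1)
        = pvMiss P st.2.1 ((n : Int) + 1) := by
      rw [hpj, hms, pvMiss_succ_right P st.2.1 (n : Int) (by omega)]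
      by_cases hPj : P ((n : Int) + 1) <;> simp [hPj]
    have hminup : ∀ i' : Int, 1 ≤ i' → i' < st.2.1 → pvMiss P i' ((n : Int) + 1) > c := by
      intro i' h1 h2
      have h3 := hmin i' h1 h2
      have h4 := pvMiss_mono_right P i' (n : Int) ((n : Int) + 1) (by omega) (by omega)
      omega
    have hshr := pvShrink_spec present c hc P hp ((n : Int) + 1) (by omega) 110002 st.2.1
      (if present.getD ((n : Int) + 1).toNat false then st.2.2 else st.2.2 + 1)
      hi1 (by omega) hmiss1 hminup (by omega)
    set im := mcnShrink present c 110002 (st.2.1,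
      if present.getD ((n : Int) + 1).toNat false then st.2.2 else st.2.2 + 1) with him
    obtain ⟨s1, s2, s3, s4, s5⟩ := hshr
    refine ⟨?_, s1, s2, s3, s4, s5, ?_, ?_⟩
    · have := le_max_left st.1 ((n : Int) + 1 - im.1 + 1); omega
    · -- achievability of the new best
      rcases max_cases st.1 ((n : Int) + 1 - im.1 + 1) with ⟨hmx, _⟩ | ⟨hmx, hlt⟩
      · rw [hmx]
        rcases hach with h0 | ⟨p, q, hp1, hpq, hqn, hfe, hval⟩
        · left; exact h0
        · right; exact ⟨p, q, hp1, hpq, by omega, hfe, hval⟩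
      · rw [hmx]
        by_cases hiend : im.1 ≤ (n : Int) + 1
        · right
          refine ⟨im.1, (n : Int) + 1, s1, hiend, le_refl _, ?_, rfl⟩
          rw [← s3]; exact s4
        · -- im.1 = n + 2, the window is empty: contribution is 0 ≤ st.1, contradiction with hlt unless st.1 = 0
          have : im.1 = (n : Int) + 2 := by omega
          omega
    · intro p q hp1 hpq hqn hfe
      by_cases hqold : q ≤ (n : Int)
      · have := hbound p q hp1 hpq hqold hfe
        have := le_max_left st.1 ((n : Int) + 1 - im.1 + 1)
        omega
      · have hq : q = (n : Int) + 1 := by omega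
        subst hq
        have hpge : im.1 ≤ p := by
          by_contra hlt2
          have := s5 p hp1 (by omega)
          omega
        have := le_max_right st.1 ((n : Int) + 1 - im.1 + 1)
        omega

-- ===== VERDICT (by name: the statement is the Claim_ definition above) =====
-- ---- the assembly: both programs compute the longest window of [1,110000]
-- ---- coverable by present values plus zero-wildcards ----

set_option maxRecDepth 65536 in
lemma pvCore (t : List Int) (ht : ∀ x ∈ t, 0 ≤ x ∧ x ≤ 110000) :
    ((PySem.List.pyRange 1 (110000 + 1) 1).foldl
      (fun mx i => max mx (mcnBS
        ((PySem.List.pyRange 1 (110000 + 1) 1).foldl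
          (fun p i => pvAset p i (pvAget p i + pvAget p (i - 1)))
          ((PySem.Set.ofList (PySem.List.sorted (t.filter (fun x => !(x == 0))) (fun x => x) false) : List Int).foldl
            (fun p x => pvAset p x (pvAget p x + 1)) (Array.replicate 110001 (0 : Int))))
        ((t.count 0 : Int)) i i 110000 0)) 0)
    = ((PySem.List.pyRange 1 (110000 + 1) 1).foldl
        (fun (st : Int × Int × Int) j =>
          let miss1 := if (t.foldl (fun (s : Array Bool × Int) x =>
              if x == 0 then (s.1, s.2 + 1)
              else if 1 ≤ x ∧ x ≤ 110000 then (s.1.setIfInBounds x.toNat true, s.2)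
              else s) (Array.replicate 110001 false, 0)).1.getD j.toNat false then st.2.2 else st.2.2 + 1
          let im := mcnShrink (t.foldl (fun (s : Array Bool × Int) x =>
              if x == 0 then (s.1, s.2 + 1)
              else if 1 ≤ x ∧ x ≤ 110000 then (s.1.setIfInBounds x.toNat true, s.2)
              else s) (Array.replicate 110001 false, 0)).1
            (t.foldl (fun (s : Array Bool × Int) x =>
              if x == 0 then (s.1, s.2 + 1)
              else if 1 ≤ x ∧ x ≤ 110000 then (s.1.setIfInBounds x.toNat true, s.2)
              else s) (Array.replicate 110001 false, 0)).2 110002 (st.2.1, miss1)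
          (max st.1 (j - im.1 + 1), im.1, im.2)) ((0 : Int), (1 : Int), (0 : Int))).1 := by
  set nz := t.filter (fun x => !(x == 0)) with hnz
  set c : Int := (t.count 0 : Int) with hC
  set v : List Int := (PySem.Set.ofList (PySem.List.sorted nz (fun x => x) false) : List Int) with hv
  set pcB := t.foldl (fun (s : Array Bool × Int) x =>
      if x == 0 then (s.1, s.2 + 1)
      else if 1 ≤ x ∧ x ≤ 110000 then (s.1.setIfInBounds x.toNat true, s.2)
      else s) (Array.replicate 110001 false, 0) with hpc
  set pref1 := v.foldl (fun p x => pvAset p x (pvAget p x + 1)) (Array.replicate 110001 (0 : Int)) with hp1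
  set prefA := (PySem.List.pyRange 1 (110000 + 1) 1).foldl
      (fun p i => pvAset p i (pvAget p i + pvAget p (i - 1))) pref1 with hpA
  set P : Int → Bool := fun k => decide (k ∈ nz) with hP
  -- facts about nz / v
  have hnzmem : ∀ x : Int, x ∈ nz → (1 ≤ x ∧ x ≤ 110000) := by
    intro x hx
    rw [hnz, List.mem_filter] at hx
    have h1 := ht x hx.1
    have h2 : x ≠ 0 := by simpa using hx.2
    omega
  have hvmem : ∀ x : Int, x ∈ v ↔ x ∈ nz := by
    intro x
    rw [hv, PySem.Set.mem_ofList]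
    exact (PySem.List.sorted_perm nz (fun x => x) false).mem_iff
  have hc0 : 0 ≤ c := by rw [hC]; positivity
  have hP0 : P 0 = false := by
    rw [hP]
    simp only [decide_eq_false_iff_not]
    intro h0
    have := hnzmem 0 h0
    omega
  -- characterize pref1
  have hrepl : ∀ k : Int, pvAget (Array.replicate 110001 (0 : Int)) k = 0 := by
    intro k
    unfold pvAget
    by_cases h : k.toNat < 110001
    · simp [Array.getD, h]
    · simp [Array.getD, h]
  have hb1 := pvBuild1 v (fun x hx => hnzmem x ((hvmem x).1 hx)) (by rw [hv]; exact PySem.Set.nodup_ofList _)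
    (Array.replicate 110001 (0 : Int)) (by simp) 
  have hpref1 : ∀ k : Int, 0 ≤ k → k ≤ 110000 → pvAget pref1 k = if P k then 1 else 0 := by
    intro k h0 h1
    rw [hp1]
    rw [(hb1 k h0 h1).2, hrepl k]
    rw [hP]
    by_cases hk : k ∈ nz
    · simp [hk, (hvmem k).2 hk]
    · have : k ∉ v := fun hh => hk ((hvmem k).1 hh)
      simp [hk, this]
  have hsz1 : pref1.size = 110001 := by
    rw [hp1]
    have := (hb1 0 (by omega) (by omega)).1
    exact this
  -- characterize prefA
  have hprefA : ∀ k : Int, 0 ≤ k → k ≤ 110000 → pvAget prefA k = pvCnt P 1 k := by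
    intro k h0 h1
    have hpp := pvPrefix P hP0 110000 (by norm_num) pref1 hsz1 hpref1 k h0 h1
    push_cast at hpp
    rw [hpA, show (110000 : Int) + 1 = 110001 from by norm_num, hpp, if_pos h1]
  -- the feasibility bridge
  have hcond : ∀ i m : Int, 1 ≤ i → i ≤ m + 1 → m ≤ 110000 →
      ((pvAget prefA m - pvAget prefA (i - 1) + c ≥ m - i + 1) ↔ pvMiss P i m ≤ c) := by
    intro i m h1 h2 h3
    rw [hprefA m (by omega) h3, hprefA (i - 1) (by omega) (by omega)]
    have hsplit := pvCnt_split P 1 i m h1 h2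
    have hadd := pvCnt_add_pvMiss P i m h2
    constructor <;> intro <;> omega
  -- characterize the marking pass
  obtain ⟨hszB, hcntB, hgetB⟩ := pvLoopB t ht (Array.replicate 110001 false) 0 (by simp)
  have hcB : pcB.2 = c := by rw [hpc, hcntB, hC]; omega
  have hgB : ∀ k : Int, 1 ≤ k → k ≤ 110000 → pcB.1.getD k.toNat false = P k := by
    intro k h0 h1
    rw [hpc, hgetB k h0 h1, hP]
    have : (Array.replicate 110001 false).getD k.toNat false = false := by
      by_cases h : k.toNat < 110001
      · simp [Array.getD, h]
      · simp [Array.getD, h]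
    rw [this, Bool.false_or, hnz]
  -- the sweep invariant at m = 110000
  have hsw := pvSweep pcB.1 pcB.2 (by rw [hcB]; exact hc0) P hgB 110000 (by norm_num)
  push_cast at hsw
  obtain ⟨hb0, hi1, hile, hms, hmsc, hmin, hach, hbound⟩ := hsw
  rw [show (110000 : Int) + 1 = 110001 from by norm_num]
  refine le_antisymm ?_ ?_
  · -- A ≤ B
    apply pvFoldlMaxLe (PySem.List.pyRange 1 110001 1) (fun i => mcnBS prefA c i i 110000 0) 0 _ hb0
    intro i hi
    have hmem := (PySem.List.mem_pyRange_one).1 hi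
    have hachv := pvBS_achieves prefA c i i 110000 0 (le_refl i) (by norm_num) (Or.inl rfl)
    rcases hachv with h0 | ⟨m, him, hm, hcnd, heq⟩
    · rw [h0]; exact hb0
    · rw [heq]
      exact hbound i m (by omega) him hm (by rw [hcB]; exact (hcond i m (by omega) (by omega) hm).1 hcnd)
  · -- B ≤ A
    have hAF := PySem.List.le_foldl_max_int (PySem.List.pyRange 1 110001 1)
      (fun i => mcnBS prefA c i i 110000 0) 0
    rcases hach with h0 | ⟨p, q, h1, h2, h3, hfe, hval⟩
    · rw [h0]; exact hAF.1
    · rw [hcB] at hfe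
      rw [hval]
      have h4 : mcnBS prefA c p p 110000 0 ≤ (PySem.List.pyRange 1 110001 1).foldl
          (fun mx i => max mx (mcnBS prefA c i i 110000 0)) 0 :=
        hAF.2 p ((PySem.List.mem_pyRange_one).2 ⟨h1, by omega⟩)
      have hdc : ∀ m' m : Int, p ≤ m' → m' ≤ m → m ≤ 110000 →
          pvAget prefA m - pvAget prefA (p - 1) + c ≥ m - p + 1 →
          pvAget prefA m' - pvAget prefA (p - 1) + c ≥ m' - p + 1 := by
        intro m' m hm1 hm2 hm3 hcm
        have hmc := (hcond p m h1 (by omega) hm3).1 hcm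
        have hmono := pvMiss_mono_right P p m' m (by omega) hm2
        exact (hcond p m' h1 (by omega) (by omega)).2 (by omega)
      have h5 : q - p + 1 ≤ mcnBS prefA c p p 110000 0 :=
        pvBS_ge prefA c p hdc p 110000 0 (le_refl p) (by norm_num)
          (fun m hm1 hm2 _ => Or.inr ⟨hm1, hm2⟩) q h2 h3
          ((hcond p q h1 (by omega) h3).2 hfe)
      omega



-- ===== VERDICT (by name: the statement is the Claim_ definition above) =====
theorem maximumConsecutiveNumbers_spec : Claim_equal_maximumConsecutiveNumbers := by
  intro arr N _hdom hpre
  obtain ⟨hlen, hvals⟩ := hpre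
  unfold Spec_maximumConsecutiveNumbers
  unfold maximumConsecutiveNumbers maximumConsecutiveNumbers_alt
  rw [pvLoopA arr N hlen]
  have htake : List.take (max N 0).toNat arr = List.take N.toNat arr := by
    congr 1
    omega
  rw [htake]
  exact pvCore (arr.take N.toNat) hvals
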